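-- pv_equiv track=rewrite | github.com/aviswerdlow/k4 | 06_DOCUMENTATION/KryptosModel/preregistered_tests.py | _kasiski_count
-- ===== SOURCE A (Python) =====
-- def _kasiski_count(text: str) -> int:
--     """Count Kasiski examination hits (repeated trigrams)"""
--     trigrams = {}
--     for i in range(len(text) - 2):
--         tri = text[i:i+3]
--         if tri not in trigrams:
--             trigrams[tri] = []
--         trigrams[tri].append(i)
--
--     count = 0
--     for tri, positions in trigrams.items():
--         if len(positions) >= 2:
--             count += len(positions) - 1
--
--     return count
-- ===== SOURCE B (Python) =====
-- def _kasiski_count(text: str) -> int: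
--     """Count Kasiski examination hits (repeated trigrams)"""
--     seen = set()
--     count = 0
--     for i in range(len(text) - 2):
--         tri = text[i:i+3]
--         if tri in seen:
--             count += 1
--         else:
--             seen.add(tri)
--     return count
-- ===== Notes on version B (the rewrite author's own statement) =====
-- stated objective: simpler
-- what changed: Replaced the dict of position lists plus a second aggregation loop with a single pass keeping a set of seen trigrams and a running count (each repeated occurrence adds 1, which equals sum(len(positions)-1)).
import Mathlib
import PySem

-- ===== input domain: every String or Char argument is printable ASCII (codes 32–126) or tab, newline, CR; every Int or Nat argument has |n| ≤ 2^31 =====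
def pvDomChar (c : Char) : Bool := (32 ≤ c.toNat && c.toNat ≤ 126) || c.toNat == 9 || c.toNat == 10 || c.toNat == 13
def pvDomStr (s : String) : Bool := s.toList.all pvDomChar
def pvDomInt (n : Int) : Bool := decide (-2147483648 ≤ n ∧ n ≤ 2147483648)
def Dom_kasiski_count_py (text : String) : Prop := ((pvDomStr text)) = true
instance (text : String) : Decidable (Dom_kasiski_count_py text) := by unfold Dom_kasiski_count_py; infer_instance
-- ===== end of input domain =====

-- B replaces A's dict-of-position-lists and second aggregation loop by one pass with a
-- set of seen trigrams and a running count (simpler decomposition; same O(n) cost).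

-- ===== PORT A =====
def kasiski_count_py (text : String) : Int :=
  let trigrams :=
    (PySem.List.pyRange 0 (PySem.Str.len text - 2) 1).foldl
      (fun d i =>
        let tri := PySem.Str.slice text (some i) (some (i + 3))
        let d := if d.contains tri then d else d.insert tri ([] : List Int)
        d.modify tri [] (fun ps => ps ++ [i]))
      PySem.Dict.empty
  trigrams.items.foldl
    (fun count p => if 2 ≤ p.2.length then count + ((p.2.length : Int) - 1) else count) 0

-- ===== PORT B =====
def kasiski_count_py_alt (text : String) : Int :=
  let st :=
    (PySem.List.pyRange 0 (PySem.Str.len text - 2) 1).foldl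
      (fun (st : PySem.Set String × Int) i =>
        let tri := PySem.Str.slice text (some i) (some (i + 3))
        if st.1.contains tri then (st.1, st.2 + 1) else (PySem.Set.add st.1 tri, st.2))
      (PySem.Set.empty, 0)
  st.2

-- ===== PRECONDITION & SPEC =====
def Spec_kasiski_count_py (text : String) (out : Int) : Prop := out = kasiski_count_py_alt text
instance (text : String) (out : Int) : Decidable (Spec_kasiski_count_py text out) := by unfold Spec_kasiski_count_py; infer_instance

-- ===== CLAIM (what is proved, stated in full; the proofs are below) =====
def Claim_equal_kasiski_count_py : Prop := ∀ (text : String), Dom_kasiski_count_py text → Spec_kasiski_count_py text (kasiski_count_py text)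

-- ===== LEMMAS AND PROOFS =====

-- the trigram text[i:i+3]
def triKey (text : String) (i : Int) : String := PySem.Str.slice text (some i) (some (i + 3))

-- the list of all trigrams of `text`, in position order
def trisL (text : String) : List String :=
  (PySem.List.pyRange 0 (PySem.Str.len text - 2) 1).map (triKey text)

-- B's loop body, on the trigram itself
def stepB (st : PySem.Set String × Int) (x : String) : PySem.Set String × Int :=
  if st.1.contains x then (st.1, st.2 + 1) else (PySem.Set.add st.1 x, st.2)

-- A's second loop body
def stepCnt (c : Int) (p : String × List Int) : Int :=
  if 2 ≤ p.2.length then c + ((p.2.length : Int) - 1) else c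

-- A's dict after the first loop, as a fold over (trigram, index) pairs
def dictA (text : String) : PySem.Dict String (List Int) :=
  ((PySem.List.pyRange 0 (PySem.Str.len text - 2) 1).map (fun i => (triKey text i, i))).foldl
    (fun d p => d.modify p.1 [] (fun ps => ps ++ [p.2])) PySem.Dict.empty

theorem getD_nil_of_not_contains (d : PySem.Dict String (List Int)) (t : String)
    (h : d.contains t = false) : d.getD t [] = [] := by
  simp only [PySem.Dict.getD, PySem.Dict.get?, PySem.Dict.contains] at *
  rcases h' : List.find? (fun p => p.1 == t) d.items with _ | ⟨p⟩
  · simp [h']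
  · have h1 := List.mem_of_find?_eq_some h'
    have h2 := List.find?_some h'
    simp at h
    exact absurd (by simpa using h2) (h p.1 p.2 h1)

-- the conditional `trigrams[tri] = []` before the append does not change the dict built
theorem stepA_eq (d : PySem.Dict String (List Int)) (t : String) (i : Int) :
    (if d.contains t then d else d.insert t ([] : List Int)).modify t [] (fun ps => ps ++ [i])
      = d.modify t [] (fun ps => ps ++ [i]) := by
  by_cases h : d.contains t = true
  · simp [h]
  · simp only [Bool.not_eq_true] at h
    simp only [h, Bool.false_eq_true, if_neg, not_false_iff, PySem.Dict.modify,
      PySem.Dict.getD_insert_self, PySem.Dict.insert_insert_self,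
      getD_nil_of_not_contains d t h]

theorem dictA_eq (text : String) :
    (PySem.List.pyRange 0 (PySem.Str.len text - 2) 1).foldl
      (fun d i =>
        (if d.contains (triKey text i) then d
         else d.insert (triKey text i) ([] : List Int)).modify (triKey text i) []
          (fun ps => ps ++ [i]))
      PySem.Dict.empty = dictA text := by
  rw [dictA, List.foldl_map]
  exact PySem.List.foldl_congr_mem _ _ _ _ (fun d i _ => stepA_eq d (triKey text i) i)

theorem keysA (text : String) : (dictA text).keys = PySem.Set.ofList (trisL text) := by
  have h := PySem.Dict.keys_foldl_modify_key
    ((PySem.List.pyRange 0 (PySem.Str.len text - 2) 1).map (fun i => (triKey text i, i)))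
    (fun p : String × Int => p.1) ([] : List Int)
    (fun _ (p : String × Int) v => v ++ [p.2]) PySem.Dict.empty
  simpa [dictA, trisL, List.map_map, PySem.Set.update, PySem.Set.ofList,
    Function.comp] using h

theorem nodup_keysA (text : String) : (dictA text).keys.Nodup := by
  rw [dictA]
  exact PySem.Dict.nodup_keys_foldl_modify_key _ (fun p : String × Int => p.1) ([] : List Int)
    (fun _ (p : String × Int) v => v ++ [p.2]) PySem.Dict.empty
    (by simp [PySem.Dict.empty, PySem.Dict.keys])

-- the stored position list of trigram k has length count of k among all trigrams
theorem getDA (text : String) (k : String) :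
    ((dictA text).getD k []).length = (trisL text).count k := by
  simp only [dictA]
  rw [PySem.Dict.getD_foldl_modify_append]
  simp only [show PySem.Dict.empty.getD k ([] : List Int) = [] from rfl, List.nil_append,
    List.length_map, List.filter_map, trisL, List.count, List.countP_map]
  rw [List.countP_eq_length_filter]
  rfl

theorem sum_map_sub_one (L : List String) (f : String → Int) :
    (L.map (fun k => f k - 1)).sum = (L.map f).sum - L.length := by
  induction L with
  | nil => simp
  | cons x t ih => simp [ih]; ring

theorem sum_counts (tris : List String) :
    ((PySem.Set.ofList tris).map (fun k => tris.count k)).sum = tris.length := by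
  classical
  have hperm : (PySem.Set.ofList tris).Perm tris.dedup := by
    rw [List.perm_ext_iff_of_nodup (PySem.Set.nodup_ofList tris) tris.nodup_dedup]
    intro a
    simp [PySem.Set.mem_ofList, List.mem_dedup]
  calc ((PySem.Set.ofList tris).map (fun k => tris.count k)).sum
      = (tris.dedup.map (fun k => tris.count k)).sum := (hperm.map _).sum_eq
    _ = tris.length := List.sum_map_count_dedup_eq_length tris

theorem countA (text : String) :
    kasiski_count_py text
      = ((trisL text).length : Int) - ((PySem.Set.ofList (trisL text)).length : Int) := by
  have h1 : kasiski_count_py text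
      = ((PySem.List.pyRange 0 (PySem.Str.len text - 2) 1).foldl
          (fun d i =>
            (if d.contains (triKey text i) then d
             else d.insert (triKey text i) ([] : List Int)).modify (triKey text i) []
              (fun ps => ps ++ [i]))
          PySem.Dict.empty).items.foldl stepCnt 0 := rfl
  rw [h1, dictA_eq,
    PySem.Dict.items_eq_map_keys (dictA text) (nodup_keysA text) ([] : List Int),
    keysA, List.foldl_map]
  have h2 : (PySem.Set.ofList (trisL text)).foldl
      (fun c k => stepCnt c (k, (dictA text).getD k [])) 0
      = (PySem.Set.ofList (trisL text)).foldl
          (fun c k => c + (((trisL text).count k : Int) - 1)) 0 := by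
    apply PySem.List.foldl_congr_mem
    intro c k hk
    have hcnt : ((dictA text).getD k []).length = (trisL text).count k := getDA text k
    have hmem : k ∈ trisL text := (PySem.Set.mem_ofList (trisL text) k).mp hk
    have hpos : 0 < (trisL text).count k := List.count_pos_iff.mpr hmem
    rw [stepCnt]
    simp only [hcnt]
    by_cases h2 : 2 ≤ (trisL text).count k
    · rw [if_pos h2]
    · rw [if_neg h2]
      have : (trisL text).count k = 1 := by omega
      rw [this]
      push_cast
      ring
  rw [h2, PySem.List.foldl_add, zero_add, sum_map_sub_one]
  have h3 : ((PySem.Set.ofList (trisL text)).map (fun k => ((trisL text).count k : Int))).sum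
      = ((trisL text).length : Int) := by
    have := sum_counts (trisL text)
    calc ((PySem.Set.ofList (trisL text)).map (fun k => ((trisL text).count k : Int))).sum
        = (((PySem.Set.ofList (trisL text)).map (fun k => (trisL text).count k)).map
            (fun n : Nat => (n : Int))).sum := by rw [List.map_map]; rfl
      _ = (((PySem.Set.ofList (trisL text)).map (fun k => (trisL text).count k)).sum : Int) :=
            (Nat.cast_list_sum _).symm
      _ = ((trisL text).length : Int) := by rw [sum_counts]
  rw [h3]

theorem lemB (l : List String) (s : PySem.Set String) (c : Int) :
    (l.foldl stepB (s, c)).2 + ((PySem.Set.update s l).length : Int)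
      = c + l.length + s.length := by
  induction l generalizing s c with
  | nil => simp [PySem.Set.update]
  | cons x t ih =>
    rw [List.foldl_cons,
      show PySem.Set.update s (x :: t) = PySem.Set.update (PySem.Set.add s x) t from rfl, stepB]
    by_cases hmem : x ∈ s
    · rw [if_pos (by simp [hmem]), PySem.Set.add_of_mem hmem]
      have := ih s (c + 1)
      push_cast [List.length_cons] at *
      omega
    · rw [if_neg (by simp [hmem])]
      have hlen : (PySem.Set.add s x).length = s.length + 1 := by
        rw [PySem.Set.add_of_not_mem hmem]; simp
      have := ih (PySem.Set.add s x) c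
      push_cast [List.length_cons, hlen] at *
      omega

theorem countB (text : String) :
    kasiski_count_py_alt text
      = ((trisL text).length : Int) - ((PySem.Set.ofList (trisL text)).length : Int) := by
  have h0 : kasiski_count_py_alt text = ((trisL text).foldl stepB (PySem.Set.empty, 0)).2 := by
    rw [trisL, List.foldl_map]; rfl
  have h1 := lemB (trisL text) PySem.Set.empty 0
  have h2 : PySem.Set.update PySem.Set.empty (trisL text) = PySem.Set.ofList (trisL text) := rfl
  rw [h2] at h1
  rw [h0]
  have h3 : ((PySem.Set.empty : PySem.Set String).length : Int) = 0 := rfl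
  rw [h3] at h1
  omega

-- ===== VERDICT (by name: the statement is the Claim_ definition above) =====
theorem kasiski_count_py_spec : Claim_equal_kasiski_count_py := by
  intro text _
  unfold Spec_kasiski_count_py
  rw [countA, countB]
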